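-- pv_equiv track=rewrite | github.com/luchete80/radioss_tutorials | inc_forming/heat.py | find_integer_substring_end_indices
-- ===== SOURCE A (Python) =====
-- def find_integer_substring_end_indices(string):
--     end_index = None
--
--     for i in range(len(string)):
--         j = len(string)-1-i
--         if string[j].isdigit():  # If the character is a digit
--             if end_index is None:  # If this is the first digit encountered
--                 end_index = j
--             # print ("END DIG " + string[j])
--         elif end_index is not None:  # If the consecutive digit sequence ends
--             break
--
--     return end_index
-- ===== SOURCE B (Python) =====
-- def find_integer_substring_end_indices(string):
--     return max((i for i, c in enumerate(string) if c.isdigit()), default=None)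
-- ===== Notes on version B (the rewrite author's own statement) =====
-- stated objective: idiomatic
-- what changed: Replaces A's right-to-left scan with mutable state and a guarded break by a single left-to-right reduction: max over the enumerated digit positions (default None).
import Mathlib
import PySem

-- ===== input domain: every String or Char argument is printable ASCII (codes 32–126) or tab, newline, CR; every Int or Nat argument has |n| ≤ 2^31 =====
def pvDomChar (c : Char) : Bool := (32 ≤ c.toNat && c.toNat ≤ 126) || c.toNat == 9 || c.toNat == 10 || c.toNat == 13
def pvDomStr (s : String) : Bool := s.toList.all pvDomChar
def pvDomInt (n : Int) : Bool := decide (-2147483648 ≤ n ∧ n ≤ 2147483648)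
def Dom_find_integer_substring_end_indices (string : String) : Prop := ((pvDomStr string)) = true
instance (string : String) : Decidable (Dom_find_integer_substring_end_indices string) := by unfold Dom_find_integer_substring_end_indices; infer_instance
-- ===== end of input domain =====

-- B replaces A's right-to-left scan with mutable state and a break by a single
-- left-to-right reduction (max over the enumerated digit positions); idiomatic, same cost.

-- ===== PORT A =====
-- the loop 'for i in range(len(string)): j = len(string)-1-i; …' with early break;
-- j is always a valid index, so string[j] is cs.getD j ' ' (the default is never used)
def pvALoop (cs : List Char) (n i : Nat) (end_index : Option Int) : Option Int :=
  if _h : i < n then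
    let j := n - 1 - i
    if PySem.Chars.isdigit (cs.getD j ' ') then
      pvALoop cs n (i+1) (if end_index = none then some (j : Int) else end_index)
    else if end_index ≠ none then end_index   -- break
    else pvALoop cs n (i+1) end_index
  else end_index
termination_by n - i

def find_integer_substring_end_indices (string : String) : Option Int :=
  pvALoop string.toList string.toList.length 0 none

-- ===== PORT B =====
def find_integer_substring_end_indices_alt (string : String) : Option Int :=
  PySem.List.max?
    (((PySem.List.enumerate string.toList 0).filter (fun p => PySem.Chars.isdigit p.2)).map (·.1))
    (fun x => x)

-- ===== PRECONDITION & SPEC =====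
def Spec_find_integer_substring_end_indices (string : String) (out : Option Int) : Prop := out = find_integer_substring_end_indices_alt string
instance (string : String) (out : Option Int) : Decidable (Spec_find_integer_substring_end_indices string out) := by unfold Spec_find_integer_substring_end_indices; infer_instance

-- ===== CLAIM (what is proved, stated in full; the proofs are below) =====
def Claim_equal_find_integer_substring_end_indices : Prop := ∀ (string : String), Dom_find_integer_substring_end_indices string → Spec_find_integer_substring_end_indices string (find_integer_substring_end_indices string)

-- ===== LEMMAS AND PROOFS =====

-- index of the rightmost digit among positions 0..j (proof-side characterisation)
def pvLast (cs : List Char) : Nat → Option Int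
  | 0 => if PySem.Chars.isdigit (cs[0]?.getD ' ') then some 0 else none
  | j+1 => if PySem.Chars.isdigit (cs[j+1]?.getD ' ') then some (((j+1 : Nat) : Int)) else pvLast cs j

-- list of digit positions, left to right (the list B reduces with max?)
def pvI (cs : List Char) : List Int :=
  ((PySem.List.enumerate cs 0).filter (fun p => PySem.Chars.isdigit p.2)).map (·.1)

theorem pvLast_unfold (cs : List Char) (j : Nat) :
    pvLast cs j = if PySem.Chars.isdigit (cs[j]?.getD ' ') then some ((j : Nat) : Int)
                  else match j with | 0 => none | j'+1 => pvLast cs j' := by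
  cases j <;> simp [pvLast]

theorem pvALoop_some (cs : List Char) (n : Nat) :
    ∀ k i e, n - i ≤ k → pvALoop cs n i (some e) = some e := by
  intro k
  induction k with
  | zero =>
    intro i e h
    unfold pvALoop
    have hlt : ¬ i < n := by omega
    simp [hlt]
  | succ k ih =>
    intro i e h
    unfold pvALoop
    by_cases hlt : i < n
    · by_cases hd : PySem.Chars.isdigit (cs[n-1-i]?.getD ' ') = true
      · simp [hlt, hd]
        exact ih (i+1) e (by omega)
      · simp [hlt, hd]
    · simp [hlt]

theorem pvALoop_none_last (cs : List Char) (n i : Nat) (hi : i < n) (hin : i + 1 = n) :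
    pvALoop cs n i none = pvLast cs (n - 1 - i) := by
  unfold pvALoop
  by_cases hd : PySem.Chars.isdigit (cs[n-1-i]?.getD ' ') = true
  · simp [hi, hd]
    rw [pvALoop_some cs n (n - (i+1)) (i+1) _ (le_refl _)]
    rw [pvLast_unfold, if_pos hd]
  · simp [hi, hd]
    unfold pvALoop
    have hlt : ¬ i + 1 < n := by omega
    have hj : n - 1 - i = 0 := by omega
    rw [hj] at hd
    simp [hlt, hj, pvLast, hd]

theorem pvALoop_none (cs : List Char) (n : Nat) :
    ∀ k i, i < n → n - i ≤ k + 1 → pvALoop cs n i none = pvLast cs (n - 1 - i) := by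
  intro k
  induction k with
  | zero =>
    intro i hi h
    exact pvALoop_none_last cs n i hi (by omega)
  | succ k ih =>
    intro i hi h
    by_cases hin : i + 1 < n
    · unfold pvALoop
      by_cases hd : PySem.Chars.isdigit (cs[n-1-i]?.getD ' ') = true
      · simp [hi, hd]
        rw [pvALoop_some cs n (n - (i+1)) (i+1) _ (le_refl _)]
        rw [pvLast_unfold, if_pos hd]
      · simp [hi, hd]
        rw [ih (i+1) hin (by omega)]
        conv_rhs => rw [pvLast_unfold]
        rw [if_neg hd]
        have hs : n - 1 - i = (n - 1 - (i+1)) + 1 := by omega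
        rw [hs]
    · exact pvALoop_none_last cs n i hi (by omega)

theorem pvI_append (cs : List Char) (c : Char) :
    pvI (cs ++ [c]) = pvI cs ++ (if PySem.Chars.isdigit c then [(cs.length : Int)] else []) := by
  unfold pvI
  rw [PySem.List.enumerate_append]
  by_cases hd : PySem.Chars.isdigit c = true
  · simp [PySem.List.enumerate_cons, PySem.List.enumerate_nil, List.filter_append, hd]
  · simp [PySem.List.enumerate_cons, PySem.List.enumerate_nil, List.filter_append, hd]

theorem pvLast_append (cs : List Char) (c : Char) :
    ∀ j, j < cs.length → pvLast (cs ++ [c]) j = pvLast cs j := by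
  intro j
  induction j with
  | zero =>
    intro h
    simp only [pvLast]
    rw [List.getElem?_append_left h]
  | succ j ih =>
    intro h
    simp only [pvLast]
    rw [List.getElem?_append_left h, ih (by omega)]

theorem pvLast_eq_getLast (cs : List Char) (h : cs ≠ []) :
    pvLast cs (cs.length - 1) = (pvI cs).getLast? := by
  induction cs using List.reverseRecOn with
  | nil => exact absurd rfl h
  | append_singleton cs c ih =>
    rw [pvI_append]
    have hlen : (cs ++ [c]).length - 1 = cs.length := by simp
    have hget : (cs ++ [c])[cs.length]?.getD ' ' = c := by
      rw [List.getElem?_append_right (le_refl _)]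
      simp
    rw [hlen, pvLast_unfold, hget]
    by_cases hd : PySem.Chars.isdigit c = true
    · simp [hd]
    · simp only [hd, if_false, Bool.false_eq_true, List.append_nil]
      cases hcs : cs.length with
      | zero =>
        have hnil : cs = [] := List.length_eq_zero_iff.mp hcs
        subst hnil
        simp [pvI, PySem.List.enumerate_nil]
      | succ m =>
        have hne : cs ≠ [] := by
          intro hh; rw [hh] at hcs; simp at hcs
        have hm : m < cs.length := by omega
        show pvLast (cs ++ [c]) m = (pvI cs).getLast?
        rw [pvLast_append cs c m hm]
        have hm1 : m = cs.length - 1 := by omega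
        rw [hm1]
        exact ih hne

theorem foldl_max_getLast (t : List Int) :
    ∀ x, (x :: t).Pairwise (· < ·) → t.foldl max x = (x :: t).getLast (by simp) := by
  induction t with
  | nil => intro x _; simp
  | cons y t ih =>
    intro x hp
    have hxy : x < y := (List.pairwise_cons.mp hp).1 y (by simp)
    have hp2 : (y :: t).Pairwise (· < ·) := (List.pairwise_cons.mp hp).2
    simp only [List.foldl_cons]
    rw [max_eq_right (le_of_lt hxy), ih y hp2]
    simp [List.getLast]

theorem max?_sorted (l : List Int) (hp : l.Pairwise (· < ·)) :
    PySem.List.max? l (fun x => x) = l.getLast? := by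
  rcases l with _ | ⟨x, t⟩
  · simp [PySem.List.max?]
  · rw [PySem.List.max?_id_cons, foldl_max_getLast t x hp]
    simp [List.getLast?_eq_some_getLast]

theorem pvI_pairwise (cs : List Char) : (pvI cs).Pairwise (· < ·) := by
  unfold pvI
  exact List.Pairwise.map _ (fun a b hab => hab)
    (List.Pairwise.filter _ (PySem.List.pairwise_lt_enumerate cs 0))

-- ===== VERDICT (by name: the statement is the Claim_ definition above) =====
theorem find_integer_substring_end_indices_spec : Claim_equal_find_integer_substring_end_indices := by
  intro s _
  unfold Spec_find_integer_substring_end_indices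
  have hB : find_integer_substring_end_indices_alt s = (pvI s.toList).getLast? := by
    show PySem.List.max? (pvI s.toList) (fun x => x) = (pvI s.toList).getLast?
    exact max?_sorted _ (pvI_pairwise _)
  rw [hB]
  unfold find_integer_substring_end_indices
  by_cases hne : s.toList = []
  · rw [hne]
    simp [pvALoop, pvI, PySem.List.enumerate_nil]
  · have hlen : 0 < s.toList.length := List.length_pos_iff.mpr hne
    rw [pvALoop_none s.toList s.toList.length s.toList.length 0 hlen (by omega)]
    simpa using pvLast_eq_getLast s.toList hne
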